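-- pv_equiv track=rewrite | github.com/jssprz/rummikub_game | logic.py | is_stair
-- ===== SOURCE A (Python) =====
-- def is_stair(tiles):
--     if len(tiles) < 3:
--         return False
--
--     current_value = tiles[0][0]
--     color = tiles[0][1]
--     for i in range(1, len(tiles)):
--         if color != tiles[i][1] or current_value+1 != tiles[i][0]:
--             return False
--         current_value = tiles[i][0]
--     return True
-- ===== SOURCE B (Python) =====
-- def is_stair(tiles):
--     # A run of >=3 tiles is a stair iff normalizing each tile by its position
--     # (value - index, color) collapses all tiles to one single pair.
--     return len(tiles) >= 3 and len({(v - i, c) for i, (v, c) in enumerate(tiles)}) == 1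
-- ===== Notes on version B (the rewrite author's own statement) =====
-- stated objective: simpler
-- what changed: Replaces A's stateful neighbor-comparison loop with a shift-normalization invariant: each tile (v,c) at index i is mapped to (v-i,c), and the tiles form a stair iff this normalized set has exactly one element; no neighbor comparisons or carried state at all.
import Mathlib
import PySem

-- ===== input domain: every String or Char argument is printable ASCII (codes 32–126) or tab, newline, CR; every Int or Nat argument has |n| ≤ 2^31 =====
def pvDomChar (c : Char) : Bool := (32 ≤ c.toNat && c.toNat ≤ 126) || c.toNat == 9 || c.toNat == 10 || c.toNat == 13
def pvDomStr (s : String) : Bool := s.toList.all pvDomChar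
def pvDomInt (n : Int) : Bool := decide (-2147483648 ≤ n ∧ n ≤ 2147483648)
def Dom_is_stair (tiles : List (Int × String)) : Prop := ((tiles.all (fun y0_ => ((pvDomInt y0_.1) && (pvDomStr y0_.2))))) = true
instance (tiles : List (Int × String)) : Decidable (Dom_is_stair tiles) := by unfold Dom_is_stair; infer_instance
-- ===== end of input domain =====

-- B replaces A's stateful neighbor-comparison loop by a shift-normalization
-- invariant: tile i is mapped to (value - i, color) and the tiles form a stair
-- iff the set of normalized tiles has exactly one element (objective: simpler).

-- ===== PORT A =====
-- the for-loop over range(1, len(tiles)), carrying (color, current_value)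
def isStairLoop (color : String) (cv : Int) : List (Int × String) → Bool
  | [] => true
  | t :: rest => if color != t.2 || cv + 1 != t.1 then false else isStairLoop color t.1 rest

def is_stair (tiles : List (Int × String)) : Bool :=
  if tiles.length < 3 then false
  else
    match tiles with
    | [] => false   -- unreachable: length ≥ 3
    | t :: rest => isStairLoop t.2 t.1 rest

-- ===== PORT B =====
def is_stair_alt (tiles : List (Int × String)) : Bool :=
  decide (3 ≤ tiles.length) &&
    (PySem.Set.len (PySem.Set.ofList
        ((PySem.List.enumerate tiles 0).map (fun p => (p.2.1 - p.1, p.2.2)))) == 1)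

-- ===== PRECONDITION & SPEC =====
def Spec_is_stair (tiles : List (Int × String)) (out : Bool) : Prop := out = is_stair_alt tiles
instance (tiles : List (Int × String)) (out : Bool) : Decidable (Spec_is_stair tiles out) := by unfold Spec_is_stair; infer_instance

-- ===== CLAIM (what is proved, stated in full; the proofs are below) =====
def Claim_equal_is_stair : Prop := ∀ (tiles : List (Int × String)), Dom_is_stair tiles → Spec_is_stair tiles (is_stair tiles)

-- ===== LEMMAS AND PROOFS =====

-- set(xs) is a singleton iff every element equals the first
lemma setlen_one {α : Type} [BEq α] [LawfulBEq α] (c : α) (cs : List α) :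
    (PySem.Set.len (PySem.Set.ofList (c :: cs)) == 1) = cs.all (· == c) := by
  rw [PySem.Set.ofList_cons]
  by_cases h : cs.all (· == c) = true
  · have hd : PySem.Set.discard (PySem.Set.ofList cs) c = [] := by
      rw [List.eq_nil_iff_forall_not_mem]
      intro x hx
      rw [PySem.Set.mem_discard] at hx
      rw [PySem.Set.mem_ofList] at hx
      simp only [List.all_eq_true, beq_iff_eq] at h
      exact hx.2 (h x hx.1)
    simp [h, hd, PySem.Set.len]
  · simp only [List.all_eq_true, beq_iff_eq] at h
    push Not at h
    obtain ⟨x, hx, hne⟩ := h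
    have hmem : x ∈ PySem.Set.discard (PySem.Set.ofList cs) c := by
      rw [PySem.Set.mem_discard, PySem.Set.mem_ofList]; exact ⟨hx, hne⟩
    have hnil : PySem.Set.discard (PySem.Set.ofList cs) c ≠ [] := by
      intro he; rw [he] at hmem; exact absurd hmem (List.not_mem_nil)
    have hlen : 1 ≤ (PySem.Set.discard (PySem.Set.ofList cs) c).length :=
      List.length_pos_iff.mpr hnil
    have hall : cs.all (· == c) = false := by
      rw [List.all_eq_false]; exact ⟨x, hx, by simp [hne]⟩
    rw [hall]
    simp [PySem.Set.len]
    omega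

-- A's loop, started at value v0 + k, succeeds iff every later tile normalizes to (v0, c)
lemma loop_norm (c : String) (v0 : Int) (k : Int) (rest : List (Int × String)) :
    isStairLoop c (v0 + k) rest =
      ((PySem.List.enumerate rest (k + 1)).map (fun p => (p.2.1 - p.1, p.2.2))).all
        (· == (v0, c)) := by
  induction rest generalizing k with
  | nil => simp [isStairLoop, PySem.List.enumerate_nil]
  | cons t rest ih =>
    rw [PySem.List.enumerate_cons, List.map_cons, List.all_cons, isStairLoop]
    split_ifs with hguard
    · rcases (by simpa using hguard : c ≠ t.2 ∨ v0 + k + 1 ≠ t.1) with h | h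
      · have : ((t.1 - (k + 1), t.2) == ((v0, c) : Int × String)) = false := by
          simp [Prod.ext_iff]; intro _ hc; exact absurd hc h.symm
        simp [this]
      · have : ((t.1 - (k + 1), t.2) == ((v0, c) : Int × String)) = false := by
          simp [Prod.ext_iff]; intro hv; exact absurd (by omega : v0 + k + 1 = t.1) h
        simp [this]
    · have hc : c = t.2 := by by_contra h; exact hguard (by simp [h])
      have hv : v0 + k + 1 = t.1 := by by_contra h; exact hguard (by simp [h])
      have hhead : ((t.1 - (k + 1), t.2) == ((v0, c) : Int × String)) = true := by
        simp [Prod.ext_iff, ← hc]; omega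
      rw [hhead]
      have : t.1 = v0 + (k + 1) := by omega
      rw [this, ih (k + 1)]
      simp

-- ===== VERDICT (by name: the statement is the Claim_ definition above) =====
theorem is_stair_spec : Claim_equal_is_stair := by
  unfold Claim_equal_is_stair Spec_is_stair
  intro tiles _
  unfold is_stair is_stair_alt
  by_cases hlen : tiles.length < 3
  · simp [hlen]
  · match tiles with
    | [] => simp at hlen
    | t :: rest =>
      rw [if_neg hlen, decide_eq_true (by omega : 3 ≤ (t :: rest).length), Bool.true_and]
      show isStairLoop t.2 t.1 rest = _
      rw [PySem.List.enumerate_cons, List.map_cons]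
      have hh : ((t.1 - 0, t.2) : Int × String) = (t.1, t.2) := by simp
      rw [hh, setlen_one]
      have := loop_norm t.2 t.1 0 rest
      rw [show t.1 + 0 = t.1 by ring] at this
      rw [this, show (0 : Int) + 1 = 1 by ring, List.all_map]
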